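-- pv_equiv track=rewrite | github.com/maxine4j/wow-drp | main.py | parse_pixels
-- ===== SOURCE A (Python) =====
-- def parse_pixels(pixels):
--     msg = ""
--     for p in pixels:
--         r, g, b = p
--         if r != 0:
--             msg += chr(r)
--     for p in pixels:
--         r, g, b = p
--         if g != 0:
--             msg += chr(g)
--     for p in pixels:
--         r, g, b = p
--         if b != 0:
--             msg += chr(b)
--     return msg
-- ===== SOURCE B (Python) =====
-- def parse_pixels(pixels):
--     reds, greens, blues = [], [], []
--     for r, g, b in pixels:
--         if r != 0:
--             reds.append(chr(r))
--         if g != 0: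
--             greens.append(chr(g))
--         if b != 0:
--             blues.append(chr(b))
--     return "".join(reds + greens + blues)
-- ===== Notes on version B (the rewrite author's own statement) =====
-- stated objective: alternative
-- what changed: One pass over pixels filling three channel buckets joined once at the end, instead of three sequential scans each growing the result string with '+='.
import Mathlib
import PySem

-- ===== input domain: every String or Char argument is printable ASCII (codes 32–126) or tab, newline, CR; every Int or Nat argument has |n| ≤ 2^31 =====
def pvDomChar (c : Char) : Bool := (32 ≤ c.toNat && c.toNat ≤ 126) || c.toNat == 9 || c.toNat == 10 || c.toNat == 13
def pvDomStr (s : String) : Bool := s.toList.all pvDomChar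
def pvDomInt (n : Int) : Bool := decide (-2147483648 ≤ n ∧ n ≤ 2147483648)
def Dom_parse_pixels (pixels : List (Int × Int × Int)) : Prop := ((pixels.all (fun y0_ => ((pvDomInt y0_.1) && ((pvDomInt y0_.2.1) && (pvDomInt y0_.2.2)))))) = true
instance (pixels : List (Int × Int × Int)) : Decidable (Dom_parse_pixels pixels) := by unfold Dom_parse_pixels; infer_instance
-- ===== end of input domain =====

-- B builds the three channel buckets in ONE pass and joins them once, instead of A's three scans with string +=.


-- chr(n) for a valid (non-surrogate) Unicode code point n; exact on Pre_parse_pixels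
def pyChr (n : Int) : Char := Char.ofNat n.toNat

-- ===== PORT A =====
-- A's three sequential passes; the growing Python str is the growing List Char, wrapped once at the end
def parse_pixels (pixels : List (Int × Int × Int)) : String :=
  let msg : List Char := []
  let msg := pixels.foldl (fun msg p => if p.1 != 0 then msg ++ [pyChr p.1] else msg) msg
  let msg := pixels.foldl (fun msg p => if p.2.1 != 0 then msg ++ [pyChr p.2.1] else msg) msg
  let msg := pixels.foldl (fun msg p => if p.2.2 != 0 then msg ++ [pyChr p.2.2] else msg) msg
  String.ofList msg

-- ===== PORT B =====
-- Source B's single pass: one fold carrying the (reds, greens, blues) buckets, then one join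
def parse_pixels_alt (pixels : List (Int × Int × Int)) : String :=
  let acc := pixels.foldl
    (fun (acc : List Char × List Char × List Char) p =>
      ( if p.1 != 0 then acc.1 ++ [pyChr p.1] else acc.1,
        if p.2.1 != 0 then acc.2.1 ++ [pyChr p.2.1] else acc.2.1,
        if p.2.2 != 0 then acc.2.2 ++ [pyChr p.2.2] else acc.2.2 ))
    ([], [], [])
  String.ofList (acc.1 ++ acc.2.1 ++ acc.2.2)

-- ===== PRECONDITION & SPEC =====
-- Pre_ excludes components outside 0..0x10FFFF, where Python's chr raises ValueError; it also excludes the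
-- surrogate codes 0xD800–0xDFFF, on which Python returns a lone-surrogate str that is not a value of Lean's
-- Char/String type (no Lean Char exists for those codes), so no port could match it.
def Pre_parse_pixels (pixels : List (Int × Int × Int)) : Prop :=
  ∀ p ∈ pixels, ∀ n ∈ [p.1, p.2.1, p.2.2],
    0 ≤ n ∧ (n < 0xD800 ∨ (0xE000 ≤ n ∧ n ≤ 0x10FFFF))
instance (pixels : List (Int × Int × Int)) : Decidable (Pre_parse_pixels pixels) := by
  unfold Pre_parse_pixels; infer_instance
def pvWitness_parse_pixels : (List (Int × Int × Int)) := [(72, 105, 0), (0, 33, 10)]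
def Spec_parse_pixels (pixels : List (Int × Int × Int)) (out : String) : Prop := out = parse_pixels_alt pixels
instance (pixels : List (Int × Int × Int)) (out : String) : Decidable (Spec_parse_pixels pixels out) := by unfold Spec_parse_pixels; infer_instance

-- ===== CLAIM (what is proved, stated in full; the proofs are below) =====
def Claim_equal_parse_pixels : Prop := ∀ (pixels : List (Int × Int × Int)), Dom_parse_pixels pixels → Pre_parse_pixels pixels → Spec_parse_pixels pixels (parse_pixels pixels)

-- ===== LEMMAS AND PROOFS =====
-- B's single fold over the bucket triple is the triple of A's three channel folds
theorem bfold_split (l : List (Int × Int × Int)) (a b c : List Char) :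
    l.foldl
      (fun (acc : List Char × List Char × List Char) p =>
        ( if p.1 != 0 then acc.1 ++ [pyChr p.1] else acc.1,
          if p.2.1 != 0 then acc.2.1 ++ [pyChr p.2.1] else acc.2.1,
          if p.2.2 != 0 then acc.2.2 ++ [pyChr p.2.2] else acc.2.2 )) (a, b, c)
    = (l.foldl (fun m p => if p.1 != 0 then m ++ [pyChr p.1] else m) a,
       l.foldl (fun m p => if p.2.1 != 0 then m ++ [pyChr p.2.1] else m) b,
       l.foldl (fun m p => if p.2.2 != 0 then m ++ [pyChr p.2.2] else m) c) := by
  induction l generalizing a b c with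
  | nil => rfl
  | cons x xs ih => simp only [List.foldl_cons, ih]

-- ===== VERDICT (by name: the statement is the Claim_ definition above) =====
theorem parse_pixels_spec : Claim_equal_parse_pixels := by
  intro pixels _ _
  unfold Spec_parse_pixels parse_pixels parse_pixels_alt
  rw [bfold_split]
  simp only [PySem.List.foldl_append_if, List.nil_append, List.append_assoc]
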